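-- pv_equiv track=rewrite | github.com/royw/taskfile_help | scripts/dev-metrics.py | _get_coverage_range
-- ===== SOURCE A (Python) =====
-- def _get_coverage_range(coverage_pct: int) -> str:
--     """Get coverage range bucket for a given percentage."""
--     ranges = [
--         (100, "100%"),
--         (90, "90-99%"),
--         (80, "80-89%"),
--         (70, "70-79%"),
--         (60, "60-69%"),
--         (50, "50-59%"),
--         (40, "40-49%"),
--         (30, "30-39%"),
--         (20, "20-29%"),
--         (10, "10-19%"),
--     ]
--     for threshold, label in ranges:
--         if coverage_pct >= threshold:
--             return label
--     return "0-9%"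
-- ===== SOURCE B (Python) =====
-- def _get_coverage_range(coverage_pct: int) -> str:
--     """Closed-form bucket label: boundary guards, then digit arithmetic."""
--     if coverage_pct >= 100:
--         return "100%"
--     if coverage_pct < 10:
--         return "0-9%"
--     d = coverage_pct // 10
--     return f"{d}0-{d}9%"
-- ===== Notes on version B (the rewrite author's own statement) =====
-- stated objective: simpler
-- what changed: Replaced the threshold list and linear scan with two boundary guards plus a closed-form floor-division digit formula building the label directly.
import Mathlib
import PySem

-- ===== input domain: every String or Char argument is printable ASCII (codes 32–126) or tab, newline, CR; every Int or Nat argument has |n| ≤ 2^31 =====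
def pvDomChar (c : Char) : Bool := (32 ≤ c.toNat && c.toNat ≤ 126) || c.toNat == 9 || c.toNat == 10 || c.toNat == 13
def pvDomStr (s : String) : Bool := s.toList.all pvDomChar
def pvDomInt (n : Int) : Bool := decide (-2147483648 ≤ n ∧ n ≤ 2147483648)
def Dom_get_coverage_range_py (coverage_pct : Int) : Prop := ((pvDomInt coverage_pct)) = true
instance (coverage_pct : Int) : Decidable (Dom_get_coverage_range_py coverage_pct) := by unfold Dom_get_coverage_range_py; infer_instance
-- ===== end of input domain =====

-- B replaces A's threshold-list scan with two boundary guards and a closed-form floor-division digit formula (objective: simpler).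

-- ===== PORT A =====
-- the loop 'for threshold, label in ranges: if coverage_pct >= threshold: return label' with the '0-9%' fallthrough
def pvScanRanges (coverage_pct : Int) : List (Int × String) → String
  | [] => "0-9%"
  | (threshold, label) :: rest =>
      if coverage_pct ≥ threshold then label else pvScanRanges coverage_pct rest

def get_coverage_range_py (coverage_pct : Int) : String :=
  pvScanRanges coverage_pct
    [(100, "100%"), (90, "90-99%"), (80, "80-89%"), (70, "70-79%"), (60, "60-69%"),
     (50, "50-59%"), (40, "40-49%"), (30, "30-39%"), (20, "20-29%"), (10, "10-19%")]

-- ===== PORT B =====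
def get_coverage_range_py_alt (coverage_pct : Int) : String :=
  if coverage_pct ≥ 100 then "100%"
  else if coverage_pct < 10 then "0-9%"
  else
    let d := PySem.Int.floordiv coverage_pct 10
    PySem.Int.toStr d ++ "0-" ++ PySem.Int.toStr d ++ "9%"

-- ===== PRECONDITION & SPEC =====
def Spec_get_coverage_range_py (coverage_pct : Int) (out : String) : Prop := out = get_coverage_range_py_alt coverage_pct
instance (coverage_pct : Int) (out : String) : Decidable (Spec_get_coverage_range_py coverage_pct out) := by unfold Spec_get_coverage_range_py; infer_instance

-- ===== CLAIM (what is proved, stated in full; the proofs are below) =====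
def Claim_equal_get_coverage_range_py : Prop := ∀ (coverage_pct : Int), Dom_get_coverage_range_py coverage_pct → Spec_get_coverage_range_py coverage_pct (get_coverage_range_py coverage_pct)

-- ===== LEMMAS AND PROOFS =====

-- in a decile [10d, 10d+10), B's closed form yields the fixed label of that decile
theorem pv_alt_decile (c d : Int) (lbl : String) (h1 : d * 10 ≤ c) (h2 : c < (d + 1) * 10)
    (hd1 : 1 ≤ d) (hd9 : d ≤ 9)
    (hlbl : PySem.Int.toStr d ++ "0-" ++ PySem.Int.toStr d ++ "9%" = lbl) :
    get_coverage_range_py_alt c = lbl := by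
  have hq : PySem.Int.floordiv c 10 = d := by
    rw [PySem.Int.floordiv_eq_iff_of_pos (by norm_num)]
    omega
  unfold get_coverage_range_py_alt
  rw [if_neg (by omega), if_neg (by omega)]
  simp only [hq, hlbl]

-- ===== VERDICT (by name: the statement is the Claim_ definition above) =====
theorem get_coverage_range_py_spec : Claim_equal_get_coverage_range_py := by
  intro c _
  unfold Spec_get_coverage_range_py
  by_cases h100 : 100 ≤ c
  · simp [get_coverage_range_py, pvScanRanges, get_coverage_range_py_alt, h100]
  by_cases h10 : c < 10
  · simp only [get_coverage_range_py, pvScanRanges, get_coverage_range_py_alt]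
    rw [if_neg (by omega), if_neg (by omega), if_neg (by omega), if_neg (by omega),
        if_neg (by omega), if_neg (by omega), if_neg (by omega), if_neg (by omega),
        if_neg (by omega), if_neg (by omega), if_neg (by omega), if_pos (by omega)]
  -- deciles 1..9
  have hA : get_coverage_range_py c =
      if 90 ≤ c then "90-99%" else if 80 ≤ c then "80-89%" else if 70 ≤ c then "70-79%"
      else if 60 ≤ c then "60-69%" else if 50 ≤ c then "50-59%" else if 40 ≤ c then "40-49%"
      else if 30 ≤ c then "30-39%" else if 20 ≤ c then "20-29%" else "10-19%" := by
    simp only [get_coverage_range_py, pvScanRanges]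
    rw [if_neg (by omega)]
    split_ifs <;> first | rfl | omega
  rw [hA]
  split_ifs with h9 h8 h7 h6 h5 h4 h3 h2
  · exact (pv_alt_decile c 9 _ (by omega) (by omega) (by omega) (by omega) (by decide)).symm
  · exact (pv_alt_decile c 8 _ (by omega) (by omega) (by omega) (by omega) (by decide)).symm
  · exact (pv_alt_decile c 7 _ (by omega) (by omega) (by omega) (by omega) (by decide)).symm
  · exact (pv_alt_decile c 6 _ (by omega) (by omega) (by omega) (by omega) (by decide)).symm
  · exact (pv_alt_decile c 5 _ (by omega) (by omega) (by omega) (by omega) (by decide)).symm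
  · exact (pv_alt_decile c 4 _ (by omega) (by omega) (by omega) (by omega) (by decide)).symm
  · exact (pv_alt_decile c 3 _ (by omega) (by omega) (by omega) (by omega) (by decide)).symm
  · exact (pv_alt_decile c 2 _ (by omega) (by omega) (by omega) (by omega) (by decide)).symm
  · exact (pv_alt_decile c 1 _ (by omega) (by omega) (by omega) (by omega) (by decide)).symm
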